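-- pv_equiv track=rewrite | github.com/cberzan/django-anger | anger/migration_utils.py | forwards_contents
-- ===== SOURCE A (Python) =====
-- def forwards_contents(f):
--     """
--     Return a string containing everything in the forwards() method of a
--     migration.
--
--     This string may not be safe to evaluate.
--     """
--     forwards_found = False
--     forwards_lines = []
--     for line in f:
--         if 'def backwards(self, orm):' in line:
--             break
--         if forwards_found:
--             forwards_lines.append(line)
--         elif 'def forwards(self, orm):' in line:
--             forwards_found = True
--     return ''.join(forwards_lines)
-- ===== SOURCE B (Python) =====
-- FWD = 'def forwards(self, orm):'
-- BWD = 'def backwards(self, orm):'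
--
-- def forwards_contents(f):
--     """
--     Return a string containing everything in the forwards() method of a
--     migration.
--
--     This string may not be safe to evaluate.
--     """
--     lines = list(f)
--     fwd = next((i for i, l in enumerate(lines) if FWD in l), None)
--     bwd = next((i for i, l in enumerate(lines) if BWD in l), None)
--     if fwd is None or (bwd is not None and bwd <= fwd):
--         return ''
--     end = bwd if bwd is not None else len(lines)
--     return ''.join(lines[fwd + 1:end])
-- ===== Notes on version B (the rewrite author's own statement) =====
-- stated objective: alternative
-- what changed: Replaces A's stateful single-pass loop (found flag + break) by an index-based decomposition: locate the first forwards-marker and first backwards-marker lines, compare the indices, and join one slice of the line list.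
import Mathlib
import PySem

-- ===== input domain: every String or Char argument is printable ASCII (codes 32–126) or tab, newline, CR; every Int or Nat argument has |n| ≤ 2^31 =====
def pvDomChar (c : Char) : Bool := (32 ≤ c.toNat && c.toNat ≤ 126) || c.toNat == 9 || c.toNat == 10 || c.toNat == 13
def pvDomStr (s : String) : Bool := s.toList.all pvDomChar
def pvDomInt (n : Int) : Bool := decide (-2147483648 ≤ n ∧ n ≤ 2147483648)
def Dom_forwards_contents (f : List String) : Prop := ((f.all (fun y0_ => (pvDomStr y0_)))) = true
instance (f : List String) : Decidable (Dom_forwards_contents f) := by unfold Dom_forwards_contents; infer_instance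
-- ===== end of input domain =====

-- ===== PORT A =====
-- B differs from A only in decomposition (first-index comparison + one slice vs a stateful loop); same return value.
def fwdMarker : String := "def forwards(self, orm):"
def bwdMarker : String := "def backwards(self, orm):"

-- A's loop: 'found' flag, break on the backwards marker.
def fcLoop : List String → Bool → List String
  | [], _ => []
  | l :: r, found =>
    if PySem.Str.isIn bwdMarker l then []
    else if found then l :: fcLoop r found
    else if PySem.Str.isIn fwdMarker l then fcLoop r true
    else fcLoop r false

def forwards_contents (f : List String) : String :=
  PySem.Str.join "" (fcLoop f false)

-- ===== PORT B =====
def forwards_contents_alt (f : List String) : String :=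
  match f.findIdx? (fun l => PySem.Str.isIn fwdMarker l),
        f.findIdx? (fun l => PySem.Str.isIn bwdMarker l) with
  | none, _ => ""
  | some fi, some bi =>
      if bi ≤ fi then ""
      else PySem.Str.join "" ((f.drop (fi + 1)).take (bi - (fi + 1)))
  | some fi, none => PySem.Str.join "" (f.drop (fi + 1))

-- ===== PRECONDITION & SPEC =====
def Spec_forwards_contents (f : List String) (out : String) : Prop := out = forwards_contents_alt f
instance (f : List String) (out : String) : Decidable (Spec_forwards_contents f out) := by unfold Spec_forwards_contents; infer_instance

-- ===== CLAIM (what is proved, stated in full; the proofs are below) =====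
def Claim_equal_forwards_contents : Prop := ∀ (f : List String), Dom_forwards_contents f → Spec_forwards_contents f (forwards_contents f)

-- ===== LEMMAS AND PROOFS =====

-- In the 'found' phase A collects all remaining lines when no backwards-marker line exists.
theorem fcLoop_true_of_findIdx_none (f : List String)
    (h : f.findIdx? (fun l => PySem.Str.isIn bwdMarker l) = none) :
    fcLoop f true = f := by
  induction f with
  | nil => rfl
  | cons l r ih =>
    rw [List.findIdx?_cons] at h
    simp only [PySem.Str.isIn] at h ih
    by_cases hq : PySem.Chars.isIn bwdMarker.toList l.toList = true
    · rw [if_pos hq] at h; exact absurd h (by simp)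
    · rw [if_neg hq] at h
      simp [fcLoop, PySem.Str.isIn, hq, ih (Option.map_eq_none_iff.mp h)]

-- In the 'found' phase A collects lines strictly before the first backwards-marker line.
theorem fcLoop_true_of_findIdx_some (f : List String) (bi : Nat)
    (h : f.findIdx? (fun l => PySem.Str.isIn bwdMarker l) = some bi) :
    fcLoop f true = f.take bi := by
  induction f generalizing bi with
  | nil => simp at h
  | cons l r ih =>
    rw [List.findIdx?_cons] at h
    simp only [PySem.Str.isIn] at h ih
    by_cases hq : PySem.Chars.isIn bwdMarker.toList l.toList = true
    · rw [if_pos hq] at h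
      obtain rfl : (0 : Nat) = bi := Option.some.inj h
      simp [fcLoop, PySem.Str.isIn, hq]
    · rw [if_neg hq] at h
      obtain ⟨b0, hb0, rfl⟩ := Option.map_eq_some_iff.mp h
      simp [fcLoop, PySem.Str.isIn, hq, ih b0 hb0]

-- Main invariant: A's loop from the initial state agrees with B on every line list.
theorem fcLoop_false_eq (f : List String) :
    PySem.Str.join "" (fcLoop f false) = forwards_contents_alt f := by
  induction f with
  | nil => rfl
  | cons l r ih =>
    by_cases hq : PySem.Chars.isIn bwdMarker.toList l.toList = true
    · -- A breaks immediately; B sees the backwards index 0 ≤ any forwards index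
      have hA : fcLoop (l :: r) false = [] := by
        simp [fcLoop, PySem.Str.isIn, hq]
      have hB : forwards_contents_alt (l :: r) = "" := by
        simp only [forwards_contents_alt, PySem.Str.isIn, List.findIdx?_cons, hq, if_true]
        by_cases hp : PySem.Chars.isIn fwdMarker.toList l.toList = true
        · simp [hp]
        · rw [if_neg hp]
          cases List.findIdx? (fun l => PySem.Chars.isIn fwdMarker.toList l.toList) r with
          | none => rfl
          | some fi => simp
      rw [hA, hB]; rfl
    · by_cases hp : PySem.Chars.isIn fwdMarker.toList l.toList = true
      · -- forwards marker found here: A switches to the collect phase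
        have hA : fcLoop (l :: r) false = fcLoop r true := by
          simp [fcLoop, PySem.Str.isIn, hq, hp]
        rw [hA]
        rcases hb : r.findIdx? (fun s => PySem.Str.isIn bwdMarker s) with _ | b0
        · rw [fcLoop_true_of_findIdx_none r hb]
          simp only [PySem.Str.isIn] at hb
          simp [forwards_contents_alt, PySem.Str.isIn, List.findIdx?_cons, hq, hp, hb]
        · rw [fcLoop_true_of_findIdx_some r b0 hb]
          simp only [PySem.Str.isIn] at hb
          simp [forwards_contents_alt, PySem.Str.isIn, List.findIdx?_cons, hq, hp, hb]
      · -- neither marker on this line: both sides discard it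
        have hA : fcLoop (l :: r) false = fcLoop r false := by
          simp [fcLoop, PySem.Str.isIn, hq, hp]
        rw [hA, ih]
        simp only [forwards_contents_alt, PySem.Str.isIn, List.findIdx?_cons,
          if_neg hq, if_neg hp]
        rcases hf : List.findIdx? (fun l => PySem.Chars.isIn fwdMarker.toList l.toList) r with _ | f0
        · rw [hf]; rfl
        · rcases hb : List.findIdx? (fun l => PySem.Chars.isIn bwdMarker.toList l.toList) r with _ | b0
          · rw [hf, hb]; rfl
          · rw [hf, hb]
            simp only [Option.map_some]
            by_cases hle : b0 ≤ f0
            · simp [hle]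
            · have h1 : ¬ (b0 + 1 ≤ f0 + 1) := by omega
              simp only [if_neg hle, if_neg h1, List.drop_succ_cons]
              congr 2
              omega

-- ===== VERDICT (by name: the statement is the Claim_ definition above) =====
theorem forwards_contents_spec : Claim_equal_forwards_contents := by
  intro f _
  unfold Spec_forwards_contents forwards_contents
  exact fcLoop_false_eq f
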